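-- pv_equiv track=rewrite | github.com/junyeong-nero/ps | programmers/sorting/재밌는-레이싱-경기장-설계하기.py | solution
-- ===== SOURCE A (Python) =====
-- def solution(heights):
--     h = sorted(heights)
--     n = len(h)
--     if n <= 1:
--         return 0
--
--     m = n // 2
--
--     # d_i = h[i+m] - h[i]
--     diffs = [h[i + m] - h[i] for i in range(m)]
--
--     if n % 2 == 0:
--         # 짝수: 최소값이 답
--         return min(diffs)
--
--     # 홀수: J = h[-1], b1 = h[m]
--     diffs.append(h[-1] - h[m])
--
--     diffs.sort()
--     return diffs[1]  # 두 번째로 작은 값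
-- ===== SOURCE B (Python) =====
-- def _push(st, d):
--     b, s = st
--     if b is None or d < b:
--         return (d, b)
--     if s is None or d < s:
--         return (b, d)
--     return (b, s)
--
--
-- def solution(heights):
--     h = sorted(heights)
--     n = len(h)
--     if n <= 1:
--         return 0
--     m = n // 2
--     st = (None, None)
--     for i in range(m):
--         st = _push(st, h[i + m] - h[i])
--     if n % 2 == 0:
--         return st[0]
--     st = _push(st, h[-1] - h[m])
--     return st[1]
-- ===== Notes on version B (the rewrite author's own statement) =====
-- stated objective: alternative
-- what changed: Replaces A's materialized diff list with min() and a second sort-then-index by a single linear two-minimum selection pass (_push) over the diffs, shared by the even and odd branches.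
import Mathlib
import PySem

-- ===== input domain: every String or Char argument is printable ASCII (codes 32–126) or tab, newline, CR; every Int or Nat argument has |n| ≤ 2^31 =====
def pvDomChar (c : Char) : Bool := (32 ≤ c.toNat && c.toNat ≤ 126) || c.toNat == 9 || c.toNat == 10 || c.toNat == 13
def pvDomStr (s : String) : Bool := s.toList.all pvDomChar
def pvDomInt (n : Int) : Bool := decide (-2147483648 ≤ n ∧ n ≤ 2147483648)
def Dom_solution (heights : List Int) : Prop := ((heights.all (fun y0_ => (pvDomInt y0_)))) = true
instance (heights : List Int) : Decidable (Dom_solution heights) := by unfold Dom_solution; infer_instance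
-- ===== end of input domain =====

-- B replaces A's min()/sort-then-index over the diff list by a single linear
-- two-minimum selection pass (objective: alternative decomposition, same cost).

-- ===== PORT A =====
-- literal transliteration of Source A; min() and diffs[1] are only reached on
-- nonempty / length ≥ 2 lists, so the .getD 0 / pyGetD defaults are unreachable
def solution (heights : List Int) : Int :=
  let h := PySem.List.sorted heights (fun x => x) false
  let n : Int := h.length
  if n ≤ 1 then 0
  else
    let m := PySem.Int.floordiv n 2
    let diffs := (PySem.List.pyRange 0 m 1).map
      (fun i => PySem.List.pyGetD h (i + m) 0 - PySem.List.pyGetD h i 0)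
    if PySem.Int.mod n 2 = 0 then
      (PySem.List.min? diffs (fun x => x)).getD 0
    else
      let diffs2 := diffs ++ [PySem.List.pyGetD h (-1) 0 - PySem.List.pyGetD h m 0]
      PySem.List.pyGetD (PySem.List.sorted diffs2 (fun x => x) false) 1 0

-- ===== PORT B =====
-- _push from Source B: fold step keeping the two smallest values seen so far
def pushB (st : Option Int × Option Int) (d : Int) : Option Int × Option Int :=
  match st with
  | (none, _) => (some d, none)
  | (some b, s) =>
    if d < b then (some d, some b)
    else
      match s with
      | none => (some b, some d)
      | some sv => if d < sv then (some b, some d) else (some b, some sv)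

def solution_alt (heights : List Int) : Int :=
  let h := PySem.List.sorted heights (fun x => x) false
  let n : Int := h.length
  if n ≤ 1 then 0
  else
    let m := PySem.Int.floordiv n 2
    let st := (PySem.List.pyRange 0 m 1).foldl
      (fun st i => pushB st (PySem.List.pyGetD h (i + m) 0 - PySem.List.pyGetD h i 0))
      (none, none)
    if PySem.Int.mod n 2 = 0 then st.1.getD 0
    else (pushB st (PySem.List.pyGetD h (-1) 0 - PySem.List.pyGetD h m 0)).2.getD 0

-- ===== PRECONDITION & SPEC =====
def Spec_solution (heights : List Int) (out : Int) : Prop := out = solution_alt heights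
instance (heights : List Int) (out : Int) : Decidable (Spec_solution heights out) := by unfold Spec_solution; infer_instance

-- ===== CLAIM (what is proved, stated in full; the proofs are below) =====
def Claim_equal_solution : Prop := ∀ (heights : List Int), Dom_solution heights → Spec_solution heights (solution heights)

-- ===== LEMMAS AND PROOFS =====

-- second-smallest value (with multiplicity) of a list
def secminF (l : List Int) : Option Int := l.min?.bind (fun m => (l.erase m).min?)

lemma min?_append_singleton (l : List Int) (x : Int) :
    (l ++ [x]).min? = some (match l.min? with | none => x | some a => min a x) := by
  cases l with
  | nil => simp
  | cons a t => simp only [List.cons_append, List.min?_cons', List.foldl_append, List.foldl_cons, List.foldl_nil]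

lemma push_step (l : List Int) (x : Int) :
    pushB (l.min?, secminF l) x = ((l ++ [x]).min?, secminF (l ++ [x])) := by
  cases hm : l.min? with
  | none =>
    have hl : l = [] := List.min?_eq_none_iff.mp hm
    subst hl
    simp [secminF, pushB]
  | some a =>
    obtain ⟨hamem, hale⟩ := List.min?_eq_some_iff.mp hm
    have h1 : (l ++ [x]).min? = some (min a x) := by
      rw [min?_append_singleton, hm]
    by_cases hxa : x < a
    · have hxnot : x ∉ l := fun hx => absurd (hale x hx) (by omega)
      have he : (l ++ [x]).erase x = l := by
        rw [List.erase_append_right _ hxnot]; simp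
      have hmx : min a x = x := by omega
      simp [pushB, secminF, hm, hxa, h1, hmx, he]
    · have hmx : min a x = a := by omega
      have he : (l ++ [x]).erase a = l.erase a ++ [x] :=
        List.erase_append_left _ hamem
      have h2 : secminF (l ++ [x]) = (l.erase a ++ [x]).min? := by
        simp [secminF, h1, hmx, he]
      rw [min?_append_singleton] at h2
      have hax : a ≤ x := by omega
      have hsl : secminF l = (l.erase a).min? := by simp [secminF, hm]
      cases hs : (l.erase a).min? with
      | none =>
        rw [hs] at h2; simp only [] at h2
        simp [pushB, hxa, hsl, hs, h1, h2, hax]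
      | some sv =>
        rw [hs] at h2; simp only [] at h2
        by_cases hxs : x < sv
        · have hm2 : min sv x = x := by omega
          rw [hm2] at h2
          simp [pushB, hxa, hsl, hs, h1, h2, hxs, hax]
        · have hm2 : min sv x = sv := by omega
          rw [hm2] at h2
          simp [pushB, hxa, hsl, hs, h1, h2, hxs, hax]

lemma foldl_push (l : List Int) :
    l.foldl pushB (none, none) = (l.min?, secminF l) := by
  induction l using List.reverseRecOn with
  | nil => simp [secminF]
  | append_singleton t x ih => rw [List.foldl_append]; simp [ih, push_step]

lemma pysem_min_id (d : List Int) : PySem.List.min? d (fun x => x) = d.min? := by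
  cases d with
  | nil => simp [PySem.List.min?]
  | cons a t => rw [PySem.List.min?_id_cons, List.min?_cons']

lemma sorted_two (d : List Int) (p q : Int) (r : List Int)
    (hs : PySem.List.sorted d (fun x => x) false = p :: q :: r) :
    d.min? = some p ∧ secminF d = some q := by
  have hperm : (p :: q :: r).Perm d := hs ▸ PySem.List.sorted_perm d (fun x => x) false
  have hpair : (p :: q :: r).Pairwise (fun a b : Int => a ≤ b) := by
    have := PySem.List.sorted_pairwise d (fun x => x)
    rwa [hs] at this
  have hple : ∀ b ∈ q :: r, p ≤ b := (List.pairwise_cons.mp hpair).1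
  have hqle : ∀ b ∈ r, q ≤ b := (List.pairwise_cons.mp (List.pairwise_cons.mp hpair).2).1
  have hminp : d.min? = some p := by
    rw [List.min?_eq_some_iff]
    constructor
    · exact hperm.mem_iff.mp (by simp)
    · intro b hb
      have : b ∈ p :: q :: r := hperm.mem_iff.mpr hb
      rcases List.mem_cons.mp this with rfl | hb2
      · exact le_refl _
      · exact hple _ hb2
  refine ⟨hminp, ?_⟩
  have hep : (d.erase p).Perm (q :: r) := by
    have := (hperm.symm.erase p)
    simpa using this
  have : (d.erase p).min? = some q := by
    rw [List.min?_eq_some_iff]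
    constructor
    · exact hep.mem_iff.mpr (by simp)
    · intro b hb
      have : b ∈ q :: r := hep.mem_iff.mp hb
      rcases List.mem_cons.mp this with rfl | hb2
      · exact le_refl _
      · exact hqle _ hb2
  simp [secminF, hminp, this]

-- ===== VERDICT (by name: the statement is the Claim_ definition above) =====
theorem solution_spec : Claim_equal_solution := by
  unfold Claim_equal_solution
  intro hs _
  unfold Spec_solution solution solution_alt
  simp only [PySem.Int.floordiv_eq_ediv_of_pos (show (0:Int) < 2 by norm_num),
             PySem.Int.mod_eq_emod_of_pos (show (0:Int) < 2 by norm_num)]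
  by_cases h1 : ((PySem.List.sorted hs (fun x => x) false).length : Int) ≤ 1
  · rw [if_pos h1, if_pos h1]
  · rw [if_neg h1, if_neg h1]
    rw [← List.foldl_map
      (f := fun i => PySem.List.pyGetD (PySem.List.sorted hs (fun x => x) false)
              (i + ((PySem.List.sorted hs (fun x => x) false).length : Int) / 2) 0
            - PySem.List.pyGetD (PySem.List.sorted hs (fun x => x) false) i 0)
      (g := pushB), foldl_push]
    set h := PySem.List.sorted hs (fun x => x) false with hh
    set m : Int := ((h.length : Int)) / 2 with hm
    set D := (PySem.List.pyRange 0 m 1).map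
      (fun i => PySem.List.pyGetD h (i + m) 0 - PySem.List.pyGetD h i 0) with hD
    by_cases hpar : ((h.length : Int)) % 2 = 0
    · simp only [hpar, pysem_min_id, ite_true]
    · simp only [hpar]
      rw [push_step]
      set e := PySem.List.pyGetD h (-1) 0 - PySem.List.pyGetD h m 0 with he
      have hDlen : 1 ≤ D.length := by
        rw [hD, List.length_map, PySem.List.length_pyRange_one]
        omega
      have hlen : 2 ≤ (PySem.List.sorted (D ++ [e]) (fun x => x) false).length := by
        rw [PySem.List.length_sorted, List.length_append]
        simp
        omega
      obtain ⟨p, q, r, hsort⟩ :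
          ∃ p q r, PySem.List.sorted (D ++ [e]) (fun x => x) false = p :: q :: r := by
        cases hl : PySem.List.sorted (D ++ [e]) (fun x => x) false with
        | nil => rw [hl] at hlen; simp at hlen
        | cons p t =>
          cases t with
          | nil => rw [hl] at hlen; simp at hlen
          | cons q r => exact ⟨p, q, r, rfl⟩
      obtain ⟨hminp, hsecq⟩ := sorted_two (D ++ [e]) p q r hsort
      rw [hsort, hsecq]
      simp [PySem.List.pyGetD, PySem.List.pyGet?, PySem.List.pyIdx?]
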